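-- pv_equiv track=rewrite | github.com/melvinmai/Modeling-Generalization-and-Bayesian-Inference | p1.py | viable_hSpace
-- ===== SOURCE A (Python) =====
-- def viable_hSpace(maxHypSize, dataMin, dataMax, data):
--     hSpace = []
--     # Create hypothesis spaces in a range of test interval
--     # Based on pseudocode from Dr. Jacobs
--     for hMin in range(100 + 1):
--         for sizeIndex in range(1, maxHypSize + 1):
--             hMax = hMin + sizeIndex - 1
--             if hMax > 100:
--                 break
--             if hMin < dataMin or hMax > dataMax:
--                 continue
--             else:
--                 viable_space = [hMin, hMax]
--
--             hSpace.append(viable_space)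
--
--     space = []
--     # Get the viable hypothesis spaces based on data
--     for interv in hSpace:
--         # Flagging to make sure all data points fits in a hypothesis interval
--         flag = 0
--         for x in data:        # Cycle through the data
--             if (x >= interv[0]) and (x <= interv[1]):
--                 flag = flag + 1
--         if flag == len(data):
--             space.append(interv)
--     # Return Viable Hypothesis spaces respect to data set
--     return space
-- ===== SOURCE B (Python) =====
-- def viable_hSpace(maxHypSize, dataMin, dataMax, data):
--     # Compute min/max of the data once, then emit exactly the viable
--     # intervals [lo, hi] directly from arithmetic bounds (no generate-and-filter).
--     lo_last, hi_floor = 100, None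
--     if data:
--         lo_last = min(100, min(data))
--         hi_floor = max(data)
--     space = []
--     for lo in range(max(0, dataMin), lo_last + 1):
--         hi_first = lo if hi_floor is None else max(lo, hi_floor)
--         hi_last = min(100, dataMax, lo + maxHypSize - 1)
--         for hi in range(hi_first, hi_last + 1):
--             space.append([lo, hi])
--     return space
-- ===== Notes on version B (the rewrite author's own statement) =====
-- stated objective: alternative
-- what changed: B computes min/max of the data once and emits the qualifying intervals directly from closed-form range bounds, instead of A's generating every candidate interval and then scanning the whole data list for each one.
import Mathlib
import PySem

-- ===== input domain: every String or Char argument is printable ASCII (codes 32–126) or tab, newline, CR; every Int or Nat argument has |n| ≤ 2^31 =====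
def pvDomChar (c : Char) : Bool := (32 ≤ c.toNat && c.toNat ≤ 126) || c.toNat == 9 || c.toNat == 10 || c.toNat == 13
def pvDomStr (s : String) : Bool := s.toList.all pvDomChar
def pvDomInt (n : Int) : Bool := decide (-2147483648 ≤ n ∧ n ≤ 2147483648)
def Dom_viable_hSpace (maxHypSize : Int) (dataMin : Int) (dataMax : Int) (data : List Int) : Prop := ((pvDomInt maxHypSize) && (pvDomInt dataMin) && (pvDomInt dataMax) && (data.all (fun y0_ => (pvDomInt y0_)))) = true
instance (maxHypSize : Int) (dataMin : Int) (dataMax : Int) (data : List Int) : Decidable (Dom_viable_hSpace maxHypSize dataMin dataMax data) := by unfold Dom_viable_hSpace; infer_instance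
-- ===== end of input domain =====

-- B replaces A's generate-then-filter of candidate intervals (a scan of the data per interval)
-- by computing min/max of the data once and emitting the surviving intervals directly from
-- arithmetic bounds (objective: alternative algorithm).

-- ===== PORT A =====
-- inner 'for sizeIndex in range(1, maxHypSize+1)' loop, with its 'break' as early return
def pvAInner (dataMin dataMax hMin stop : Int) (sizeIndex : Int) (hSpace : List (List Int)) : List (List Int) :=
  -- 'for sizeIndex in range(1, maxHypSize + 1)' walked lazily (like Python's range), with 'break' as early return
  if _h : sizeIndex < stop then
    let hMax := hMin + sizeIndex - 1
    if hMax > 100 then hSpace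
    else if hMin < dataMin ∨ hMax > dataMax then pvAInner dataMin dataMax hMin stop (sizeIndex + 1) hSpace
    else pvAInner dataMin dataMax hMin stop (sizeIndex + 1) (hSpace ++ [[hMin, hMax]])
  else hSpace
termination_by (stop - sizeIndex).toNat
decreasing_by all_goals omega

def viable_hSpace (maxHypSize : Int) (dataMin : Int) (dataMax : Int) (data : List Int) : List (List Int) :=
  let hSpace := (PySem.List.pyRange 0 (100 + 1) 1).foldl
    (fun hSpace hMin => pvAInner dataMin dataMax hMin (maxHypSize + 1) 1 hSpace) []
  hSpace.foldl (fun space interv =>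
    -- interv[0] / interv[1]: every interv is a 2-element list, so the index is always in range
    let flag := data.foldl (fun flag x =>
      if PySem.List.pyGetD interv 0 0 ≤ x ∧ x ≤ PySem.List.pyGetD interv 1 0 then flag + 1 else flag) (0 : Int)
    if flag = (data.length : Int) then space ++ [interv] else space) []

-- ===== PORT B =====
def viable_hSpace_alt (maxHypSize : Int) (dataMin : Int) (dataMax : Int) (data : List Int) : List (List Int) :=
  let loLast : Int := match PySem.List.min? data (fun x => x) with
    | none => 100
    | some m => min 100 m
  let hiFloor : Option Int := PySem.List.max? data (fun x => x)
  (PySem.List.pyRange (max 0 dataMin) (loLast + 1) 1).foldl (fun space lo =>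
    let hiFirst : Int := match hiFloor with
      | none => lo
      | some m => max lo m
    let hiLast : Int := min (min 100 dataMax) (lo + maxHypSize - 1)
    (PySem.List.pyRange hiFirst (hiLast + 1) 1).foldl (fun space hi => space ++ [[lo, hi]]) space) []

-- ===== PRECONDITION & SPEC =====
def Spec_viable_hSpace (maxHypSize : Int) (dataMin : Int) (dataMax : Int) (data : List Int) (out : List (List Int)) : Prop := out = viable_hSpace_alt maxHypSize dataMin dataMax data
instance (maxHypSize : Int) (dataMin : Int) (dataMax : Int) (data : List Int) (out : List (List Int)) : Decidable (Spec_viable_hSpace maxHypSize dataMin dataMax data out) := by unfold Spec_viable_hSpace; infer_instance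

-- ===== CLAIM (what is proved, stated in full; the proofs are below) =====
def Claim_equal_viable_hSpace : Prop := ∀ (maxHypSize : Int) (dataMin : Int) (dataMax : Int) (data : List Int), Dom_viable_hSpace maxHypSize dataMin dataMax data → Spec_viable_hSpace maxHypSize dataMin dataMax data (viable_hSpace maxHypSize dataMin dataMax data)

-- ===== LEMMAS AND PROOFS =====

theorem pvRange_takeWhile_le (c : Int) (p : Int → Bool) (hp : ∀ s, p s = decide (s ≤ c)) :
    ∀ (n : Nat) (a b : Int), (b - a).toNat = n →
      (PySem.List.pyRange a b 1).takeWhile p = PySem.List.pyRange a (min b (c+1)) 1 := by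
  intro n
  induction n with
  | zero =>
    intro a b h
    rw [@PySem.List.pyRange_one_eq_nil a b (by omega),
        @PySem.List.pyRange_one_eq_nil a (min b (c+1)) (by omega)]
    simp
  | succ k ih =>
    intro a b h
    rw [@PySem.List.pyRange_one_cons a b (by omega), List.takeWhile_cons, hp]
    by_cases hc : a ≤ c
    · rw [decide_eq_true hc, if_pos rfl, ih (a+1) b (by omega),
          @PySem.List.pyRange_one_cons a (min b (c+1)) (by omega)]
    · rw [decide_eq_false hc]
      simp only [Bool.false_eq_true, if_false]
      rw [@PySem.List.pyRange_one_eq_nil a (min b (c+1)) (by omega)]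

theorem pvRange_filter_between (c d : Int) (p : Int → Bool) (hp : ∀ s, p s = decide (c ≤ s ∧ s ≤ d)) :
    ∀ (n : Nat) (a b : Int), (b - a).toNat = n →
      (PySem.List.pyRange a b 1).filter p = PySem.List.pyRange (max a c) (min b (d+1)) 1 := by
  intro n
  induction n with
  | zero =>
    intro a b h
    rw [@PySem.List.pyRange_one_eq_nil a b (by omega),
        @PySem.List.pyRange_one_eq_nil (max a c) (min b (d+1)) (by omega)]
    simp
  | succ k ih =>
    intro a b h
    rw [@PySem.List.pyRange_one_cons a b (by omega), List.filter_cons, hp, ih (a+1) b (by omega)]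
    by_cases h1 : c ≤ a
    · by_cases h2 : a ≤ d
      · rw [decide_eq_true ⟨h1, h2⟩, if_pos rfl,
            @PySem.List.pyRange_one_cons (max a c) (min b (d+1)) (by omega)]
        congr 2 <;> omega
      · rw [decide_eq_false (by omega : ¬ (c ≤ a ∧ a ≤ d))]
        simp only [Bool.false_eq_true, if_false]
        rw [@PySem.List.pyRange_one_eq_nil (max (a+1) c) (min b (d+1)) (by omega),
            @PySem.List.pyRange_one_eq_nil (max a c) (min b (d+1)) (by omega)]
    · rw [decide_eq_false (by omega : ¬ (c ≤ a ∧ a ≤ d))]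
      simp only [Bool.false_eq_true, if_false]
      congr 1
      omega

theorem pvFlatMap_filter_of_nil {α β : Type} (g : α → List β) (p : α → Bool) (l : List α)
    (h : ∀ x ∈ l, p x = false → g x = []) : l.flatMap g = (l.filter p).flatMap g := by
  induction l with
  | nil => rfl
  | cons x t ih =>
    rw [List.flatMap_cons, List.filter_cons]
    by_cases hx : p x
    · rw [if_pos hx, List.flatMap_cons, ih (fun y hy => h y (List.mem_cons_of_mem _ hy))]
    · simp only [Bool.not_eq_true] at hx
      rw [if_neg (by simp [hx]), h x List.mem_cons_self hx, List.nil_append,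
          ih (fun y hy => h y (List.mem_cons_of_mem _ hy))]

theorem pvFilter_flatMap {α β : Type} (l : List α) (g : α → List β) (p : β → Bool) :
    (l.flatMap g).filter p = l.flatMap (fun x => (g x).filter p) := by
  induction l with
  | nil => rfl
  | cons x t ih => simp [List.flatMap_cons, List.filter_append, ih]

theorem pvMap_pyRange_shift {α : Type} (f : Int → α) (a b k : Int) :
    (PySem.List.pyRange a b 1).map (fun s => f (s + k)) = (PySem.List.pyRange (a+k) (b+k) 1).map f := by
  rw [PySem.List.pyRange_one, PySem.List.pyRange_one, List.map_map, List.map_map]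
  have : b + k - (a + k) = b - a := by ring
  rw [this]
  apply List.map_congr_left
  intro n _
  simp only [Function.comp_apply]
  congr 1
  ring

theorem pvFlatMap_congr_mem {α β : Type} (l : List α) (f g : α → List β)
    (h : ∀ x ∈ l, f x = g x) : l.flatMap f = l.flatMap g := by
  induction l with
  | nil => rfl
  | cons x t ih =>
    rw [List.flatMap_cons, List.flatMap_cons, h x List.mem_cons_self,
        ih (fun y hy => h y (List.mem_cons_of_mem _ hy))]

theorem pvAInner_eq (dataMin dataMax hMin : Int) :
    ∀ (n : Nat) (s stop : Int), (stop - s).toNat = n → ∀ (acc : List (List Int)),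
    pvAInner dataMin dataMax hMin stop s acc =
      acc ++ (((PySem.List.pyRange s stop 1).takeWhile (fun s => decide (hMin + s - 1 ≤ 100))).filter
        (fun s => decide (dataMin ≤ hMin ∧ hMin + s - 1 ≤ dataMax))).map (fun s => [hMin, hMin + s - 1]) := by
  intro n
  induction n with
  | zero =>
    intro s stop h acc
    rw [pvAInner, dif_neg (by omega), @PySem.List.pyRange_one_eq_nil s stop (by omega)]
    simp
  | succ k ih =>
    intro s stop h acc
    rw [pvAInner, dif_pos (by omega : s < stop),
        @PySem.List.pyRange_one_cons s stop (by omega), List.takeWhile_cons]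
    by_cases h1 : hMin + s - 1 > 100
    · rw [if_pos h1, decide_eq_false (by omega : ¬ hMin + s - 1 ≤ 100)]
      simp
    · rw [if_neg h1, decide_eq_true (by omega : hMin + s - 1 ≤ 100), if_pos rfl, List.filter_cons]
      by_cases h2 : hMin < dataMin ∨ hMin + s - 1 > dataMax
      · rw [if_pos h2, ih (s+1) stop (by omega) acc,
            decide_eq_false (by omega : ¬ (dataMin ≤ hMin ∧ hMin + s - 1 ≤ dataMax))]
        simp
      · rw [if_neg h2, ih (s+1) stop (by omega) (acc ++ [[hMin, hMin + s - 1]]),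
            decide_eq_true (by omega : dataMin ≤ hMin ∧ hMin + s - 1 ≤ dataMax), if_pos rfl]
        simp

theorem pvAInner_eq' (dataMin dataMax hMin stop : Int) (acc : List (List Int)) :
    pvAInner dataMin dataMax hMin stop 1 acc =
      acc ++ (((PySem.List.pyRange 1 stop 1).takeWhile (fun s => decide (hMin + s - 1 ≤ 100))).filter
        (fun s => decide (dataMin ≤ hMin ∧ hMin + s - 1 ≤ dataMax))).map (fun s => [hMin, hMin + s - 1]) :=
  pvAInner_eq dataMin dataMax hMin (stop - 1).toNat 1 stop rfl acc

theorem pvRange_filter_le (c : Int) (p : Int → Bool) (hp : ∀ s, p s = decide (s ≤ c)) :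
    ∀ (n : Nat) (a b : Int), (b - a).toNat = n →
      (PySem.List.pyRange a b 1).filter p = PySem.List.pyRange a (min b (c+1)) 1 := by
  intro n
  induction n with
  | zero =>
    intro a b h
    rw [@PySem.List.pyRange_one_eq_nil a b (by omega),
        @PySem.List.pyRange_one_eq_nil a (min b (c+1)) (by omega)]
    simp
  | succ k ih =>
    intro a b h
    rw [@PySem.List.pyRange_one_cons a b (by omega), List.filter_cons, hp, ih (a+1) b (by omega)]
    by_cases hc : a ≤ c
    · rw [decide_eq_true hc, if_pos rfl, @PySem.List.pyRange_one_cons a (min b (c+1)) (by omega)]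
    · rw [decide_eq_false hc]
      simp only [Bool.false_eq_true, if_false]
      rw [@PySem.List.pyRange_one_eq_nil (a+1) (min b (c+1)) (by omega),
          @PySem.List.pyRange_one_eq_nil a (min b (c+1)) (by omega)]

theorem pvRange_filter_ge (c : Int) (p : Int → Bool) (hp : ∀ s, p s = decide (c ≤ s)) :
    ∀ (n : Nat) (a b : Int), (b - a).toNat = n →
      (PySem.List.pyRange a b 1).filter p = PySem.List.pyRange (max a c) b 1 := by
  intro n
  induction n with
  | zero =>
    intro a b h
    rw [@PySem.List.pyRange_one_eq_nil a b (by omega),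
        @PySem.List.pyRange_one_eq_nil (max a c) b (by omega)]
    simp
  | succ k ih =>
    intro a b h
    rw [@PySem.List.pyRange_one_cons a b (by omega), List.filter_cons, hp, ih (a+1) b (by omega)]
    by_cases hc : c ≤ a
    · rw [decide_eq_true hc, if_pos rfl, @PySem.List.pyRange_one_cons (max a c) b (by omega)]
      congr 2 <;> omega
    · rw [decide_eq_false hc]
      simp only [Bool.false_eq_true, if_false]
      congr 1
      omega

theorem pvFlatMap_pure {α β : Type} (l : List α) (f : α → β) :
    l.flatMap (fun y => [f y]) = l.map f := by
  induction l with
  | nil => rfl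
  | cons x t ih => simp [List.flatMap_cons, ih]

theorem pvAll_iff (lo hi x : Int) (t : List Int) :
    ((0:Int) + ↑(List.countP (fun y => decide (lo ≤ y ∧ y ≤ hi)) (x :: t)) = ↑((x :: t).length)) ↔
    (lo ≤ List.foldl min x t ∧ List.foldl max x t ≤ hi) := by
  rw [zero_add, Int.natCast_inj, List.countP_eq_length]
  constructor
  · intro h
    have hmn := h _ (PySem.List.min?_mem (PySem.List.min?_id_cons x t))
    have hmx := h _ (PySem.List.max?_mem (PySem.List.max?_id_cons x t))
    simp only [decide_eq_true_eq] at hmn hmx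
    exact ⟨hmn.1, hmx.2⟩
  · rintro ⟨h1, h2⟩ y hy
    have hy1 := PySem.List.min?_isMin (PySem.List.min?_id_cons x t) y hy
    have hy2 := PySem.List.max?_isMax (PySem.List.max?_id_cons x t) y hy
    simp only [decide_eq_true_eq]
    omega

theorem pvPerLo_nil (m dMin dMax lo : Int) (hdm : dMin ≤ lo) :
    List.map (fun s => [lo, lo + s - 1])
      (List.filter (fun s => decide (dMin ≤ lo ∧ lo + s - 1 ≤ dMax))
        (List.takeWhile (fun s => decide (lo + s - 1 ≤ 100)) (PySem.List.pyRange 1 (m+1) 1)))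
    = List.map (fun hi => [lo, hi])
        (PySem.List.pyRange lo (min (min 100 dMax) (lo + m - 1) + 1) 1) := by
  rw [pvRange_takeWhile_le (101 - lo) (fun s => decide (lo + s - 1 ≤ 100))
        (fun s => by simp only [decide_eq_decide]; omega) (m + 1 - 1).toNat 1 (m+1) rfl]
  rw [pvRange_filter_le (dMax - lo + 1) (fun s => decide (dMin ≤ lo ∧ lo + s - 1 ≤ dMax))
        (fun s => by simp only [decide_eq_decide]; omega)
        (min (m+1) (101 - lo + 1) - 1).toNat 1 (min (m+1) (101 - lo + 1)) rfl]
  calc List.map (fun s => [lo, lo + s - 1])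
        (PySem.List.pyRange 1 (min (min (m+1) (101 - lo + 1)) (dMax - lo + 1 + 1)) 1)
      = List.map (fun s => (fun hi => [lo, hi]) (s + (lo - 1)))
        (PySem.List.pyRange 1 (min (min (m+1) (101 - lo + 1)) (dMax - lo + 1 + 1)) 1) := by
        apply List.map_congr_left
        intro s _
        have : lo + s - 1 = s + (lo - 1) := by ring
        rw [this]
    _ = List.map (fun hi => [lo, hi])
        (PySem.List.pyRange (1 + (lo - 1)) (min (min (m+1) (101 - lo + 1)) (dMax - lo + 1 + 1) + (lo - 1)) 1) :=
        pvMap_pyRange_shift (fun hi => [lo, hi]) 1 _ (lo - 1)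
    _ = List.map (fun hi => [lo, hi])
        (PySem.List.pyRange lo (min (min 100 dMax) (lo + m - 1) + 1) 1) := by
        rw [show (1 : Int) + (lo - 1) = lo by ring,
            show min (min (m+1) (101 - lo + 1)) (dMax - lo + 1 + 1) + (lo - 1)
               = min (min 100 dMax) (lo + m - 1) + 1 by omega]

theorem pvGetD0 (a b : Int) : PySem.List.pyGetD [a,b] 0 0 = a := by
  simp [PySem.List.pyGetD, PySem.List.pyGet?, PySem.List.pyIdx?]

theorem pvGetD1 (a b : Int) : PySem.List.pyGetD [a,b] 1 0 = b := by
  simp [PySem.List.pyGetD, PySem.List.pyGet?, PySem.List.pyIdx?]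

theorem pvPerLo_cons (m dMin dMax lo x : Int) (t : List Int)
    (hdm : dMin ≤ lo) (hmn : lo ≤ List.foldl min x t) :
    List.filter
      (fun interv =>
        decide ((0:Int) + ↑(List.countP (fun y => decide (PySem.List.pyGetD interv 0 0 ≤ y ∧ y ≤ PySem.List.pyGetD interv 1 0)) (x :: t)) =
          ↑((x :: t).length)))
      (List.map (fun s => [lo, lo + s - 1])
        (List.filter (fun s => decide (dMin ≤ lo ∧ lo + s - 1 ≤ dMax))
          (List.takeWhile (fun s => decide (lo + s - 1 ≤ 100)) (PySem.List.pyRange 1 (m+1) 1))))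
    = List.map (fun hi => [lo, hi])
        (PySem.List.pyRange (max lo (List.foldl max x t)) (min (min 100 dMax) (lo + m - 1) + 1) 1) := by
  rw [pvRange_takeWhile_le (101 - lo) (fun s => decide (lo + s - 1 ≤ 100))
        (fun s => by simp only [decide_eq_decide]; omega) (m + 1 - 1).toNat 1 (m+1) rfl]
  rw [List.filter_map, List.filter_filter]
  rw [List.filter_congr (l := PySem.List.pyRange 1 (min (m+1) (101 - lo + 1)) 1)
    (q := fun s => decide (List.foldl max x t - lo + 1 ≤ s ∧ s ≤ dMax - lo + 1))
    (by
      intro s _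
      simp only [Function.comp_apply, pvGetD0, pvGetD1]
      rw [decide_eq_decide.mpr (pvAll_iff lo (lo + s - 1) x t), ← Bool.decide_and, decide_eq_decide]
      omega)]
  rw [pvRange_filter_between (List.foldl max x t - lo + 1) (dMax - lo + 1)
        (fun s => decide (List.foldl max x t - lo + 1 ≤ s ∧ s ≤ dMax - lo + 1))
        (fun s => rfl)
        (min (m+1) (101 - lo + 1) - 1).toNat 1 (min (m+1) (101 - lo + 1)) rfl]
  calc List.map (fun s => [lo, lo + s - 1])
        (PySem.List.pyRange (max 1 (List.foldl max x t - lo + 1)) (min (min (m+1) (101 - lo + 1)) (dMax - lo + 1 + 1)) 1)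
      = List.map (fun s => (fun hi => [lo, hi]) (s + (lo - 1)))
        (PySem.List.pyRange (max 1 (List.foldl max x t - lo + 1)) (min (min (m+1) (101 - lo + 1)) (dMax - lo + 1 + 1)) 1) := by
        apply List.map_congr_left
        intro s _
        have : lo + s - 1 = s + (lo - 1) := by ring
        rw [this]
    _ = List.map (fun hi => [lo, hi])
        (PySem.List.pyRange (max 1 (List.foldl max x t - lo + 1) + (lo - 1)) (min (min (m+1) (101 - lo + 1)) (dMax - lo + 1 + 1) + (lo - 1)) 1) :=
        pvMap_pyRange_shift (fun hi => [lo, hi]) _ _ (lo - 1)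
    _ = List.map (fun hi => [lo, hi])
        (PySem.List.pyRange (max lo (List.foldl max x t)) (min (min 100 dMax) (lo + m - 1) + 1) 1) := by
        rw [show max 1 (List.foldl max x t - lo + 1) + (lo - 1) = max lo (List.foldl max x t) by omega,
            show min (min (m+1) (101 - lo + 1)) (dMax - lo + 1 + 1) + (lo - 1)
               = min (min 100 dMax) (lo + m - 1) + 1 by omega]

theorem pvMain (m dMin dMax : Int) (data : List Int) :
    viable_hSpace m dMin dMax data = viable_hSpace_alt m dMin dMax data := by
  unfold viable_hSpace viable_hSpace_alt
  simp only [pvAInner_eq', PySem.List.foldl_append_eq_flatMap, PySem.List.foldl_ite_add_one,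
    PySem.List.foldl_append_ite_eq_filter, List.nil_append]
  rw [pvFilter_flatMap]
  cases data with
  | nil =>
    simp only [List.countP_nil, List.length_nil, Nat.cast_zero, add_zero]
    simp only [decide_true, List.filter_true]
    refine Eq.trans (pvFlatMap_filter_of_nil _ (fun lo => decide (dMin ≤ lo)) _ ?_) ?_
    · intro lo _ hfalse
      simp only [decide_eq_false_iff_not] at hfalse
      rw [List.map_eq_nil_iff]
      exact List.filter_eq_nil_iff.mpr (fun s _ => by simp only [decide_eq_true_eq]; omega)
    · rw [pvRange_filter_ge dMin (fun lo => decide (dMin ≤ lo)) (fun s => rfl)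
            ((100 + 1 - 0 : Int)).toNat 0 (100 + 1) rfl]
      apply pvFlatMap_congr_mem
      intro lo hlo
      rw [PySem.List.mem_pyRange_one] at hlo
      rw [pvFlatMap_pure]
      exact pvPerLo_nil m dMin dMax lo (by omega)
  | cons x t =>
    simp only [PySem.List.min?_id_cons, PySem.List.max?_id_cons]
    refine Eq.trans (pvFlatMap_filter_of_nil _
      (fun lo => decide (dMin ≤ lo ∧ lo ≤ List.foldl min x t)) _ ?_) ?_
    · intro lo _ hfalse
      simp only [decide_eq_false_iff_not] at hfalse
      apply List.filter_eq_nil_iff.mpr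
      intro interv hmem
      obtain ⟨s, hsY, rfl⟩ := List.mem_map.mp hmem
      have hq := (List.mem_filter.mp hsY).2
      simp only [decide_eq_true_eq] at hq
      simp only [pvGetD0, pvGetD1, decide_eq_true_eq, pvAll_iff]
      omega
    · rw [pvRange_filter_between dMin (List.foldl min x t)
            (fun lo => decide (dMin ≤ lo ∧ lo ≤ List.foldl min x t)) (fun s => rfl)
            ((100 + 1 - 0 : Int)).toNat 0 (100 + 1) rfl]
      rw [show min ((100 : Int) + 1) (List.foldl min x t + 1) = min 100 (List.foldl min x t) + 1 by omega]
      apply pvFlatMap_congr_mem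
      intro lo hlo
      rw [PySem.List.mem_pyRange_one] at hlo
      rw [pvFlatMap_pure]
      exact pvPerLo_cons m dMin dMax lo x t (by omega) (by omega)

-- ===== VERDICT (by name: the statement is the Claim_ definition above) =====
theorem viable_hSpace_spec : Claim_equal_viable_hSpace := by
  intro maxHypSize dataMin dataMax data _
  unfold Spec_viable_hSpace
  exact pvMain maxHypSize dataMin dataMax data
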